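-- pv_equiv track=rewrite | github.com/BDR-Pro/EGYBEST-Scraper | egy.py | findVideoLink
-- ===== SOURCE A (Python) =====
-- def findVideoLink(txt):
--     txt=str(txt) #convert to string
--     x=txt.find('http') #check if the link starts with http
--     y=txt.find('mp4') #check if the link ends with mp4
--     z=txt.find('m3u8') #if it does not end with mp4 then it must end with m3u8
--     n=txt.find('mkv') #if it does not end with mp4 then it must end with m3u8
--     g = txt.find('avi')
--     b = txt.find('flv')
--     k=txt.find('webm')
--     l=txt.find('mov')
--     q=txt.find('wmv')
--     exe=[y,z,n,g,b,k,l,q]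
--     temp = [i for i in exe if (i!=-1)]
--     y=min(temp) #find the minimum value
--     return txt[x:y+3] #find the mp4 link
-- ===== SOURCE B (Python) =====
-- def findVideoLink(txt):
--     txt = str(txt)
--     x = txt.find('http')
--     exts = ('mp4', 'm3u8', 'mkv', 'avi', 'flv', 'webm', 'mov', 'wmv')
--     y = next(i for i in range(len(txt)) if txt.startswith(exts, i))
--     return txt[x:y + 3]
-- ===== Notes on version B (the rewrite author's own statement) =====
-- stated objective: alternative
-- what changed: Replaces the eight separate full-text find() scans plus filter/min with a single left-to-right scan that stops at the first position where any of the eight extensions starts (which is exactly the minimum of the non-failing finds).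
import Mathlib
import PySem

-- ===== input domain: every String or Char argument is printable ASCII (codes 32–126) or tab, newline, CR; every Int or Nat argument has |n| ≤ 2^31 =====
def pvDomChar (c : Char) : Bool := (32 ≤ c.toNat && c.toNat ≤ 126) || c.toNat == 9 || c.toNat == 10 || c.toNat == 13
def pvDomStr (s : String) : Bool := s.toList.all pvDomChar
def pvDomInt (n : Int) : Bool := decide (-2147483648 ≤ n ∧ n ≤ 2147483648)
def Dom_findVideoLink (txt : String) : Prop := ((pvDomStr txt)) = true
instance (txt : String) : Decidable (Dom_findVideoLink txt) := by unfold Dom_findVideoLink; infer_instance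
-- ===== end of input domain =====

-- B replaces A's eight separate full-text .find scans + filter + min by one left-to-right scan
-- that stops at the first position where any of the eight extensions starts (objective: alternative).

-- ===== PORT A =====
def findVideoLink (txt : String) : String :=
  let x := PySem.Str.find txt "http"
  let y := PySem.Str.find txt "mp4"
  let z := PySem.Str.find txt "m3u8"
  let n := PySem.Str.find txt "mkv"
  let g := PySem.Str.find txt "avi"
  let b := PySem.Str.find txt "flv"
  let k := PySem.Str.find txt "webm"
  let l := PySem.Str.find txt "mov"
  let q := PySem.Str.find txt "wmv"
  let exe : List Int := [y, z, n, g, b, k, l, q]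
  let temp := exe.filter (fun i => i ≠ -1)
  match PySem.List.min? temp (fun i => i) with
  | some y2 => PySem.Str.slice txt (some x) (some (y2 + 3))
  | none => ""  -- Python raises ValueError (min of empty list); excluded by Pre_

-- ===== PORT B =====
-- the tuple of extensions, as lists of chars
def pvExts : List (List Char) :=
  ["mp4".toList, "m3u8".toList, "mkv".toList, "avi".toList, "flv".toList, "webm".toList, "mov".toList, "wmv".toList]

-- txt.startswith(exts, i) on the suffix starting at i
def pvStartsAny (l : List Char) : Bool := pvExts.any (fun e => e.isPrefixOf l)

-- next(i for i in range(len(txt)) if txt.startswith(exts, i)) : first matching position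
def pvFirstExt : List Char → Nat → Option Nat
  | [], _ => none
  | c :: rest, i => if pvStartsAny (c :: rest) then some i else pvFirstExt rest (i + 1)

def findVideoLink_alt (txt : String) : String :=
  let x := PySem.Str.find txt "http"
  match pvFirstExt txt.toList 0 with
  | some y => PySem.Str.slice txt (some x) (some ((y : Int) + 3))
  | none => ""  -- Python raises StopIteration; excluded by Pre_

-- ===== PRECONDITION & SPEC =====
-- Pre_ excludes texts containing none of the eight extensions, on which A raises ValueError (min of empty list).
def Pre_findVideoLink (txt : String) : Prop :=
  (pvExts.any (fun e => PySem.Chars.isIn e txt.toList)) = true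
instance (txt : String) : Decidable (Pre_findVideoLink txt) := by unfold Pre_findVideoLink; infer_instance
def pvWitness_findVideoLink : String := "http://a.mp4"

def Spec_findVideoLink (txt : String) (out : String) : Prop := out = findVideoLink_alt txt
instance (txt : String) (out : String) : Decidable (Spec_findVideoLink txt out) := by unfold Spec_findVideoLink; infer_instance

-- ===== CLAIM (what is proved, stated in full; the proofs are below) =====
def Claim_equal_findVideoLink : Prop := ∀ (txt : String), Dom_findVideoLink txt → Pre_findVideoLink txt → Spec_findVideoLink txt (findVideoLink txt)

-- ===== LEMMAS AND PROOFS =====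

theorem pvStartsAny_iff (l : List Char) :
    pvStartsAny l = true ↔ ∃ e ∈ pvExts, e <+: l := by
  simp [pvStartsAny, List.any_eq_true, List.isPrefixOf_iff_prefix]

theorem pvFirstExt_none (l : List Char) (i : Nat) (h : pvFirstExt l i = none) :
    ∀ j, pvStartsAny (l.drop j) = false := by
  induction l generalizing i with
  | nil => intro j; simp [List.drop_nil]; decide
  | cons c rest ih =>
    intro j
    rw [pvFirstExt] at h
    by_cases hs : pvStartsAny (c :: rest) = true
    · simp [hs] at h
    · simp [hs] at h
      cases j with
      | zero => simpa using hs
      | succ j' => exact ih _ h j'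

theorem pvFirstExt_some (l : List Char) (i : Nat) (y : Nat) (h : pvFirstExt l i = some y) :
    ∃ k, y = i + k ∧ pvStartsAny (l.drop k) = true ∧ ∀ j < k, pvStartsAny (l.drop j) = false := by
  induction l generalizing i with
  | nil => simp [pvFirstExt] at h
  | cons c rest ih =>
    rw [pvFirstExt] at h
    by_cases hs : pvStartsAny (c :: rest) = true
    · simp [hs] at h
      exact ⟨0, by omega, by simpa using hs, by omega⟩
    · simp [hs] at h
      obtain ⟨k, hk, hocc, hbef⟩ := ih _ h
      refine ⟨k + 1, by omega, by simpa using hocc, ?_⟩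
      intro j hj
      cases j with
      | zero => simpa using hs
      | succ j' => simpa using hbef j' (by omega)

-- the eight finds of A as a map over pvExts
theorem pvExe_eq (L : List Char) :
    [PySem.Chars.find L "mp4".toList, PySem.Chars.find L "m3u8".toList, PySem.Chars.find L "mkv".toList,
     PySem.Chars.find L "avi".toList, PySem.Chars.find L "flv".toList, PySem.Chars.find L "webm".toList,
     PySem.Chars.find L "mov".toList, PySem.Chars.find L "wmv".toList]
      = pvExts.map (fun e => PySem.Chars.find L e) := by
  simp [pvExts]

theorem findVideoLink_spec' (txt : String) (hpre : Pre_findVideoLink txt) :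
    findVideoLink txt = findVideoLink_alt txt := by
  unfold Pre_findVideoLink at hpre
  simp only [findVideoLink, findVideoLink_alt, PySem.Str.find_eq]
  set L := txt.toList with hL
  -- temp, rewritten through the map form
  rw [pvExe_eq L]
  set temp := (pvExts.map (fun e => PySem.Chars.find L e)).filter (fun i => i ≠ -1) with htemp
  -- temp is nonempty: Pre_ gives an extension occurring in txt
  obtain ⟨e0, he0, hin0⟩ := List.any_eq_true.mp hpre
  have hfind0 : PySem.Chars.find L e0 ≠ -1 := by
    rw [PySem.Chars.find_ne_neg_one_iff]
    exact Iff.mp (PySem.Chars.isIn_iff_infix e0 L) hin0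
  have hmem0 : PySem.Chars.find L e0 ∈ temp := by
    rw [htemp]
    refine List.mem_filter.mpr ⟨List.mem_map.mpr ⟨e0, he0, rfl⟩, by simpa using hfind0⟩
  have htempne : temp ≠ [] := fun h => by simp [h] at hmem0
  obtain ⟨m, hm⟩ : ∃ m, PySem.List.min? temp (fun i => i) = some m := by
    cases hmm : PySem.List.min? temp (fun i => i) with
    | none => exact absurd (Iff.mp (PySem.List.min?_eq_none_iff temp (fun i => i)) hmm) htempne
    | some m => exact ⟨m, rfl⟩
  have hmmem : m ∈ temp := PySem.List.min?_mem hm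
  have hmmin : ∀ t ∈ temp, m ≤ t := fun t ht => PySem.List.min?_isMin hm t ht
  -- m is a find value, hence ≥ 0 and an occurrence position
  obtain ⟨e1, he1, hme1⟩ : ∃ e ∈ pvExts, PySem.Chars.find L e = m := by
    have := (List.mem_filter.mp hmmem).1
    obtain ⟨e, he, heq⟩ := List.mem_map.mp this
    exact ⟨e, he, heq⟩
  have hmne : m ≠ -1 := by
    have := (List.mem_filter.mp hmmem).2; simpa using this
  have hmnn : 0 ≤ m := by
    have := PySem.Chars.neg_one_le_find L e1
    omega
  have hmcast : (m.toNat : Int) = m := Int.toNat_of_nonneg hmnn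
  -- occurrence at m.toNat
  have hspec1 := PySem.Chars.find_spec (s := L) (sub := e1) (by rw [hme1]; exact hmnn)
  have hoccm : pvStartsAny (L.drop m.toNat) = true := by
    rw [pvStartsAny_iff]
    rw [hme1] at hspec1
    exact ⟨e1, he1, hspec1.1⟩
  -- no occurrence before m.toNat
  have hnobef : ∀ j < m.toNat, pvStartsAny (L.drop j) = false := by
    intro j hj
    by_contra hocc
    rw [Bool.not_eq_false, pvStartsAny_iff] at hocc
    obtain ⟨e, he, hpre'⟩ := hocc
    have hinf : e <:+: L :=
      Iff.mp (PySem.Chars.isIn_iff_infix e L) (Iff.mp (PySem.Chars.exists_prefix_drop_iff_isIn e L) ⟨j, hpre'⟩)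
    have hfnn : 0 ≤ PySem.Chars.find L e := Iff.mpr (PySem.Chars.find_nonneg_iff L e) hinf
    have hspec := PySem.Chars.find_spec (s := L) (sub := e) hfnn
    have hle : (PySem.Chars.find L e).toNat ≤ j := by
      by_contra hgt
      exact hspec.2 j (by omega) hpre'
    have hmemf : PySem.Chars.find L e ∈ temp := by
      rw [htemp]
      refine List.mem_filter.mpr ⟨List.mem_map.mpr ⟨e, he, rfl⟩, by simp; omega⟩
    have := hmmin _ hmemf
    omega
  -- pvFirstExt returns some m.toNat
  have hfe : pvFirstExt L 0 = some m.toNat := by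
    cases hfx : pvFirstExt L 0 with
    | none =>
      have := pvFirstExt_none L 0 hfx m.toNat
      rw [hoccm] at this; exact absurd this (by simp)
    | some k =>
      obtain ⟨k', hk', hocck, hbefk⟩ := pvFirstExt_some L 0 k hfx
      have hkk : k = k' := by omega
      subst hkk
      rcases Nat.lt_trichotomy k m.toNat with hlt | heq | hgt
      · have := hnobef k hlt; rw [hocck] at this; simp at this
      · rw [heq]
      · have := hbefk m.toNat hgt; rw [hoccm] at this; simp at this
  rw [hm, hfe]
  simp [hmcast]

-- ===== VERDICT (by name: the statement is the Claim_ definition above) =====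
theorem findVideoLink_spec : Claim_equal_findVideoLink := by
  intro txt _ hpre
  exact findVideoLink_spec' txt hpre
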